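-- pv_equiv track=rewrite | github.com/daniel-reich/turbo-robot | 9AMT6SC4Jz8tExihs_9.py | countStrings
-- ===== SOURCE A (Python) =====
-- def countStrings(n):
--     x=[]
--     x.append(0)
--     p = (1 << n)
--     for i in range(1, p):
--         if ((i & (i << 1)) == 0):
--             x.append(i)
--     return x
-- ===== SOURCE B (Python) =====
-- def countStrings(n):
--     # Fibonacci-style construction: numbers < 2^n with no two adjacent set bits,
--     # in increasing order, are L(n) = L(n-1) ++ [2^(n-1) + x for x in L(n-2)].
--     if n <= 0:
--         return [0]
--     a, b = [0], [0, 1]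
--     for k in range(2, n + 1):
--         a, b = b, b + [(1 << (k - 1)) + x for x in a]
--     return b
-- ===== Notes on version B (the rewrite author's own statement) =====
-- stated objective: alternative
-- what changed: B generates the fibbinary numbers directly in increasing order by a Fibonacci-style recurrence (the valid numbers of the next bit-width are those of the previous width followed by the top-bit translates of those two widths back) instead of testing every integer below the power bound for adjacent set bits; work is proportional to the output, but both sides still grow exponentially in n, so a timing run could not confirm a speed-up at the largest sizes.
import Mathlib
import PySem

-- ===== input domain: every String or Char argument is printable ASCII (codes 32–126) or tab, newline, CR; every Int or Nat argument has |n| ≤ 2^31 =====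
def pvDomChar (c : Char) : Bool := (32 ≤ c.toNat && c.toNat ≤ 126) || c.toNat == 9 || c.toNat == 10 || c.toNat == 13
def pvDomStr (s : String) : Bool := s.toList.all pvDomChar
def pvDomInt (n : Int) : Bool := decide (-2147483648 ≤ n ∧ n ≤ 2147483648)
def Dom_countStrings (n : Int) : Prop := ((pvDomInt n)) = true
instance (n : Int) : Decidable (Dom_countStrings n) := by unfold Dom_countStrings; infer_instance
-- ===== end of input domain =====

-- B replaces A's scan-and-test of every integer below the power bound by a Fibonacci-style
-- recurrence (each width's list is the previous width's list followed by the top-bit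
-- translates of the list two widths back), generating the result directly in increasing
-- order; output-sensitive work (objective: alternative).

-- ===== PORT A =====
-- helper: the loop's test 'i & (i << 1) == 0'
def pvOk (i : Int) : Bool := PySem.Int.band i (i <<< (1 : Nat)) == 0

def countStrings (n : Int) : List Int :=
  let x : List Int := [0]
  let p : Int := (1 : Int) <<< n.toNat
  (PySem.List.pyRange 1 p 1).foldl (fun acc i => if pvOk i then acc ++ [i] else acc) x

-- ===== PORT B =====
def countStrings_alt (n : Int) : List Int :=
  if n ≤ 0 then [0]
  else
    ((PySem.List.pyRange 2 (n + 1) 1).foldl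
      (fun (ab : List Int × List Int) k =>
        (ab.2, ab.2 ++ ab.1.map (fun x => ((1 : Int) <<< (k - 1).toNat) + x)))
      ([0], [0, 1])).2

-- ===== PRECONDITION & SPEC =====
-- Pre_ excludes only n < 0, where Python's '1 << n' raises ValueError.
def Pre_countStrings (n : Int) : Prop := 0 ≤ n
instance (n : Int) : Decidable (Pre_countStrings n) := by unfold Pre_countStrings; infer_instance
def pvWitness_countStrings : Int := 3

def Spec_countStrings (n : Int) (out : List Int) : Prop := out = countStrings_alt n
instance (n : Int) (out : List Int) : Decidable (Spec_countStrings n out) := by unfold Spec_countStrings; infer_instance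

-- ===== CLAIM (what is proved, stated in full; the proofs are below) =====
def Claim_equal_countStrings : Prop := ∀ (n : Int), Dom_countStrings n → Pre_countStrings n → Spec_countStrings n (countStrings n)

-- ===== LEMMAS AND PROOFS =====

-- the Fibonacci-style ladder both programs compute
def fibL : Nat → List Int
  | 0 => [0]
  | 1 => [0, 1]
  | (k + 2) => fibL (k + 1) ++ (fibL k).map (fun x => (2 : Int) ^ (k + 1) + x)

def pvOkN (j : Nat) : Bool := j &&& 2 * j == 0

lemma pvOk_natCast (j : Nat) : pvOk (j : Int) = pvOkN j := by
  have h1 : ((j : Int)) <<< (1 : Nat) = ((j <<< 1 : Nat) : Int) := by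
    simp [Int.shiftLeft_eq, Nat.shiftLeft_eq]
  unfold pvOk pvOkN
  rw [h1, PySem.Int.band_natCast]
  simp [Nat.shiftLeft_eq, Nat.mul_comm]

lemma tb_two_pow_add (k j i : Nat) (hj : j < 2 ^ (k + 1)) :
    (2 ^ (k + 1) + j).testBit i = ((i == k + 1) || j.testBit i) := by
  rcases lt_trichotomy i (k + 1) with h | h | h
  · rw [Nat.testBit_two_pow_add_gt h]
    simp [Nat.ne_of_lt h]
  · subst h
    rw [Nat.testBit_two_pow_add_eq, Nat.testBit_lt_two_pow hj]
    simp
  · have h2 : 2 ^ (k + 1) + j < 2 ^ i := by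
      have : 2 ^ (k + 2) ≤ 2 ^ i := Nat.pow_le_pow_right (by norm_num) h
      have : 2 ^ (k + 1) + 2 ^ (k + 1) ≤ 2 ^ i := by
        calc 2 ^ (k + 1) + 2 ^ (k + 1) = 2 ^ (k + 2) := by ring
        _ ≤ 2 ^ i := this
      omega
    have h3 : j < 2 ^ i := by omega
    rw [Nat.testBit_lt_two_pow h2, Nat.testBit_lt_two_pow h3]
    simp [Nat.ne_of_gt h]

lemma tb_high (j t k : Nat) (hj : j < 2 ^ k) (ht : k ≤ t) : j.testBit t = false :=
  Nat.testBit_lt_two_pow (lt_of_lt_of_le hj (Nat.pow_le_pow_right (by norm_num) ht))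

lemma and2_eq_zero_iff (a : Nat) :
    (a &&& 2 * a = 0) ↔ ∀ i, ¬(a.testBit (i + 1) = true ∧ a.testBit i = true) := by
  have h2a : ∀ i, (2 * a).testBit (i + 1) = a.testBit i := by
    intro i
    rw [Nat.testBit_add_one]
    congr 1
    omega
  constructor
  · intro h i ⟨hi1, hi0⟩
    have := congrArg (fun x => Nat.testBit x (i + 1)) h
    simp only [Nat.testBit_land, Nat.zero_testBit] at this
    rw [h2a i, hi1, hi0] at this
    simp at this
  · intro h
    apply Nat.zero_of_testBit_eq_false
    intro t
    rw [Nat.testBit_land]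
    cases t with
    | zero =>
      have : (2 * a).testBit 0 = false := by
        simp [Nat.testBit_zero, Nat.mul_mod_right]
      simp [this]
    | succ i =>
      rw [h2a i]
      have := h i
      cases hx : a.testBit (i + 1) <;> cases hy : a.testBit i <;> simp_all

lemma ok_add_pow (k j : Nat) (hj : j < 2 ^ (k + 1)) :
    ((2 ^ (k + 1) + j) &&& 2 * (2 ^ (k + 1) + j) = 0) ↔ (j < 2 ^ k ∧ j &&& 2 * j = 0) := by
  rw [and2_eq_zero_iff, and2_eq_zero_iff]
  constructor
  · intro h
    have hk : j.testBit k = false := by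
      by_contra hc
      simp only [Bool.not_eq_false] at hc
      exact h k ⟨by rw [tb_two_pow_add k j (k + 1) hj]; simp,
                 by simp [tb_two_pow_add k j k hj, hc]⟩
    have hlt : j < 2 ^ k := by
      by_contra hge
      push Not at hge
      have : j.testBit k = true :=
        Nat.testBit_of_two_pow_le_and_two_pow_add_one_gt hge hj
      simp [this] at hk
    refine ⟨hlt, fun i ⟨h1, h0⟩ => ?_⟩
    have hi1 : i + 1 < k + 1 := by
      by_contra hge
      push Not at hge
      rw [tb_high j (i + 1) (k + 1) hj hge] at h1
      exact absurd h1 (by simp)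
    exact h i ⟨by simp [tb_two_pow_add k j (i + 1) hj, h1],
               by simp [tb_two_pow_add k j i hj, h0]⟩
  · rintro ⟨hjk, hp⟩ i ⟨h1, h0⟩
    rw [tb_two_pow_add k j (i + 1) hj] at h1
    rw [tb_two_pow_add k j i hj] at h0
    by_cases hik : i = k
    · subst hik
      have : j.testBit i = false := tb_high j i i hjk le_rfl
      simp [this] at h0
    · have h1' : j.testBit (i + 1) = true := by
        rcases Bool.or_eq_true_iff.mp h1 with h | h
        · exact absurd (by simpa using h) (by omega)
        · exact h
      have h0' : j.testBit i = true := by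
        rcases Bool.or_eq_true_iff.mp h0 with h | h
        · have hik1 : i = k + 1 := by simpa using h
          exact absurd h1' (by simp [tb_high j (i + 1) (k + 1) hj (by omega)])
        · exact h
      exact hp i ⟨h1', h0'⟩

-- pvOk on a shifted nonnegative integer
lemma pvOk_shift (k : Nat) (x : Int) (h0 : 0 ≤ x) (hx : x < 2 ^ (k + 1)) :
    pvOk ((2 : Int) ^ (k + 1) + x) = (decide (x < 2 ^ k) && pvOk x) := by
  obtain ⟨j, rfl⟩ := Int.eq_ofNat_of_zero_le h0
  have hj : j < 2 ^ (k + 1) := by exact_mod_cast hx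
  have hcast : (2 : Int) ^ (k + 1) + (j : Int) = (((2 ^ (k + 1) + j : Nat)) : Int) := by
    push_cast; ring
  rw [hcast, pvOk_natCast, pvOk_natCast]
  unfold pvOkN
  have hdec : ((j : Int) < (2 : Int) ^ k) ↔ (j < 2 ^ k) := by exact_mod_cast Iff.rfl
  simp only [hdec]
  by_cases hA : 2 ^ (k + 1) + j &&& 2 * (2 ^ (k + 1) + j) = 0
  · obtain ⟨hu, hv⟩ := (ok_add_pow k j hj).mp hA
    simp [hA, hu, hv]
  · have hno : ¬(j < 2 ^ k ∧ j &&& 2 * j = 0) := fun hw => hA ((ok_add_pow k j hj).mpr hw)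
    by_cases hu : j < 2 ^ k
    · have hv : j &&& 2 * j ≠ 0 := fun hv => hno ⟨hu, hv⟩
      simp [hA, hu, hv]
    · simp [hA, hu]

lemma pyRange_shift (c : Int) : PySem.List.pyRange c (2 * c) 1 = (PySem.List.pyRange 0 c 1).map (fun x => c + x) := by
  rw [PySem.List.pyRange_one, PySem.List.pyRange_one, List.map_map]
  have : 2 * c - c = c - 0 := by ring
  rw [this]
  apply List.map_congr_left
  intro k _
  simp

-- the filter A computes equals the ladder
lemma filter_eq_fib : ∀ m : Nat, (PySem.List.pyRange 0 ((2 : Int) ^ m) 1).filter pvOk = fibL m := by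
  intro m
  induction m using fibL.induct with
  | case1 => decide
  | case2 => decide
  | case3 k ih1 ih2 =>
    have hsplit : PySem.List.pyRange 0 ((2 : Int) ^ (k + 2)) 1 =
        PySem.List.pyRange 0 ((2 : Int) ^ (k + 1)) 1 ++
        PySem.List.pyRange ((2 : Int) ^ (k + 1)) ((2 : Int) ^ (k + 2)) 1 := by
      apply PySem.List.pyRange_one_append
      · positivity
      · have : (2 : Int) ^ (k + 1) ≤ 2 ^ (k + 2) := by
          apply pow_le_pow_right₀ <;> omega
        exact this
    have hdouble : (2 : Int) ^ (k + 2) = 2 * 2 ^ (k + 1) := by ring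
    rw [hsplit, List.filter_append, ih1, hdouble, pyRange_shift, List.filter_map]
    simp only [Function.comp_def]
    congr 1
    -- filter (pvOk ∘ (2^(k+1) + ·)) over [0, 2^(k+1)) = filter pvOk over [0, 2^k)
    have hsplit2 : PySem.List.pyRange 0 ((2 : Int) ^ (k + 1)) 1 =
        PySem.List.pyRange 0 ((2 : Int) ^ k) 1 ++
        PySem.List.pyRange ((2 : Int) ^ k) ((2 : Int) ^ (k + 1)) 1 := by
      apply PySem.List.pyRange_one_append
      · positivity
      · apply pow_le_pow_right₀ <;> omega
    rw [hsplit2, List.filter_append]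
    have hlow : (PySem.List.pyRange 0 ((2 : Int) ^ k) 1).filter
        (fun x => pvOk ((2 : Int) ^ (k + 1) + x)) = fibL k := by
      rw [← ih2]
      apply List.filter_congr
      intro x hx
      rw [PySem.List.mem_pyRange_one] at hx
      have hx2 : x < (2 : Int) ^ (k + 1) := by
        calc x < (2 : Int) ^ k := hx.2
        _ ≤ 2 ^ (k + 1) := by apply pow_le_pow_right₀ <;> omega
      rw [pvOk_shift k x hx.1 hx2]
      simp [hx.2]
    have hhigh : (PySem.List.pyRange ((2 : Int) ^ k) ((2 : Int) ^ (k + 1)) 1).filter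
        (fun x => pvOk ((2 : Int) ^ (k + 1) + x)) = [] := by
      rw [List.filter_eq_nil_iff]
      intro x hx
      rw [PySem.List.mem_pyRange_one] at hx
      have h0 : (0 : Int) ≤ x := le_trans (by positivity) hx.1
      rw [pvOk_shift k x h0 hx.2]
      simp [not_lt.mpr hx.1]
    rw [hlow, hhigh, List.append_nil]

-- A computes the filter over [0, 2^m)
lemma countStrings_eq_fib (n : Int) (_hn : 0 ≤ n) : countStrings n = fibL n.toNat := by
  unfold countStrings
  simp only []
  rw [PySem.List.foldl_append_if_eq_filter]
  have hp : (1 : Int) <<< n.toNat = (2 : Int) ^ n.toNat := by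
    simp [Int.shiftLeft_eq]
  rw [hp]
  have hcons : PySem.List.pyRange 0 ((2 : Int) ^ n.toNat) 1 =
      0 :: PySem.List.pyRange 1 ((2 : Int) ^ n.toNat) 1 := by
    apply PySem.List.pyRange_one_cons
    positivity
  have h0 : pvOk 0 = true := by decide
  have := filter_eq_fib n.toNat
  rw [hcons, List.filter_cons, h0] at this
  simpa using this

-- B's fold climbs the same ladder
lemma alt_fold (m : Nat) (hm : 1 ≤ m) :
    ((PySem.List.pyRange 2 ((m : Int) + 1) 1).foldl
      (fun (ab : List Int × List Int) k =>
        (ab.2, ab.2 ++ ab.1.map (fun x => ((1 : Int) <<< (k - 1).toNat) + x)))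
      ([0], [0, 1])) = (fibL (m - 1), fibL m) := by
  induction m, hm using Nat.le_induction with
  | base =>
    rw [PySem.List.pyRange_one_eq_nil (by norm_num)]
    rfl
  | succ m hm ih =>
    have hstep : PySem.List.pyRange 2 (((m + 1 : Nat) : Int) + 1) 1 =
        PySem.List.pyRange 2 ((m : Int) + 1) 1 ++ [(m : Int) + 1] := by
      push_cast
      rw [PySem.List.pyRange_one_succ_right (by exact_mod_cast by omega)]
    rw [hstep, List.foldl_append, ih]
    simp only [List.foldl_cons, List.foldl_nil, Nat.add_sub_cancel]
    have ht : (((m : Int) + 1) - 1).toNat = m := by omega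
    have hsh : (1 : Int) <<< ((m : Int)) = (2 : Int) ^ m := by
      have h := Int.shiftLeft_natCast 1 m
      norm_num [Nat.shiftLeft_eq] at h
      exact h
    have hfib : fibL (m + 1) = fibL m ++ (fibL (m - 1)).map (fun x => (2 : Int) ^ m + x) := by
      have e : m + 1 = (m - 1) + 2 := by omega
      rw [e]
      simp only [fibL]
      have e2 : m - 1 + 1 = m := by omega
      rw [e2]
    rw [hfib, ht, hsh]

lemma alt_eq_fib (n : Int) (hn : 0 ≤ n) : countStrings_alt n = fibL n.toNat := by
  unfold countStrings_alt
  by_cases h0 : n ≤ 0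
  · have : n = 0 := le_antisymm h0 hn
    subst this
    rfl
  · rw [if_neg h0]
    push Not at h0
    have hm : 1 ≤ n.toNat := by omega
    have hcast : (n : Int) + 1 = ((n.toNat : Int)) + 1 := by
      rw [Int.toNat_of_nonneg hn]
    rw [hcast, alt_fold n.toNat hm]

-- ===== VERDICT (by name: the statement is the Claim_ definition above) =====
theorem countStrings_spec : Claim_equal_countStrings := by
  intro n _ hpre
  unfold Spec_countStrings
  rw [countStrings_eq_fib n hpre, alt_eq_fib n hpre]
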